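-- pv_equiv track=rewrite | github.com/charlesattix/pilotai-credit-spreads | ml/position_sizer.py | _get_correlated_tickers
-- ===== SOURCE A (Python) =====
-- from typing import Dict, List, Optional
--
-- def _get_correlated_tickers(ticker: str) -> List[str]:
--     """
--     Get list of tickers correlated with given ticker.
--
--     Simplified version - in production, calculate actual correlations.
--     """
--     # Major index ETFs (highly correlated)
--     index_etfs = ['SPY', 'QQQ', 'IWM', 'DIA']
--
--     # Tech stocks (correlated)
--     tech_stocks = ['AAPL', 'MSFT', 'GOOGL', 'AMZN', 'NVDA', 'META', 'TSLA', 'QQQ']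
--
--     # Financial stocks
--     financials = ['JPM', 'BAC', 'GS', 'MS', 'C', 'WFC', 'XLF']
--
--     if ticker in index_etfs:
--         return [t for t in index_etfs if t != ticker]
--     elif ticker in tech_stocks:
--         return [t for t in tech_stocks if t != ticker]
--     elif ticker in financials:
--         return [t for t in financials if t != ticker]
--     else:
--         # Assume correlation with major index
--         return ['SPY']
-- ===== SOURCE B (Python) =====
-- from typing import Dict, List, Optional
--
-- def _get_correlated_tickers(ticker: str) -> List[str]:
--     """Edge-list version: flatten groups into a (ticker, partner) relation
--     (first group wins for duplicates like QQQ), then answer with one filter pass."""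
--     groups = [
--         ['SPY', 'QQQ', 'IWM', 'DIA'],
--         ['AAPL', 'MSFT', 'GOOGL', 'AMZN', 'NVDA', 'META', 'TSLA', 'QQQ'],
--         ['JPM', 'BAC', 'GS', 'MS', 'C', 'WFC', 'XLF'],
--     ]
--     edges = []
--     seen = set()
--     for g in groups:
--         for a in g:
--             if a not in seen:
--                 seen.add(a)
--                 edges.extend((a, b) for b in g if b != a)
--     result = [b for a, b in edges if a == ticker]
--     return result if result else ['SPY']
-- ===== Notes on version B (the rewrite author's own statement) =====
-- stated objective: alternative
-- what changed: Replaces the if/elif chain of membership scans over grouped lists by a flat relational representation: the groups are flattened once into a (ticker, partner) edge list with first-group-wins deduplication, and the answer is a single filter pass over that relation with ['SPY'] as the empty fallback.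
import Mathlib
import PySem

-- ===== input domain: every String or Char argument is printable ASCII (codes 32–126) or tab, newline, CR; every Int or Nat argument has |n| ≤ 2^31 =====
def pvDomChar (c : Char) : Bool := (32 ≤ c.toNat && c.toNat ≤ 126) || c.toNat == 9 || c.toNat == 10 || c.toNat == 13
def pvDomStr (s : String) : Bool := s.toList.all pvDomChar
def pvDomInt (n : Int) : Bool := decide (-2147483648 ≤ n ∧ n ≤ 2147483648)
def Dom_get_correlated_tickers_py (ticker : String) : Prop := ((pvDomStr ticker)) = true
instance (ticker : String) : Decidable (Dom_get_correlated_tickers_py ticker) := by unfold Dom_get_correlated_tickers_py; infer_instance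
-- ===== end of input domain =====

-- B flattens the groups into one (ticker, partner) edge relation (first group wins) and answers by a single filter over it; alternative structure, same hardcoded data.

-- ===== PORT A =====
def get_correlated_tickers_py (ticker : String) : List String :=
  let index_etfs : List String := ["SPY", "QQQ", "IWM", "DIA"]
  let tech_stocks : List String := ["AAPL", "MSFT", "GOOGL", "AMZN", "NVDA", "META", "TSLA", "QQQ"]
  let financials : List String := ["JPM", "BAC", "GS", "MS", "C", "WFC", "XLF"]
  if index_etfs.contains ticker then index_etfs.filter (fun t => !(t == ticker))
  else if tech_stocks.contains ticker then tech_stocks.filter (fun t => !(t == ticker))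
  else if financials.contains ticker then financials.filter (fun t => !(t == ticker))
  else ["SPY"]

-- ===== PORT B =====
def pvGroups : List (List String) :=
  [["SPY", "QQQ", "IWM", "DIA"],
   ["AAPL", "MSFT", "GOOGL", "AMZN", "NVDA", "META", "TSLA", "QQQ"],
   ["JPM", "BAC", "GS", "MS", "C", "WFC", "XLF"]]

-- for g in groups: for a in g: if a not in seen: seen.add(a); edges.extend((a,b) for b in g if b != a)
-- state = (seen : Python set, edges)
def pvEdges : List (String × String) :=
  (pvGroups.foldl
    (fun (st : PySem.Set String × List (String × String)) g =>
      g.foldl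
        (fun st a =>
          if PySem.Set.contains st.1 a then st
          else (PySem.Set.add st.1 a,
                st.2 ++ (g.filter (fun b => !(b == a))).map (fun b => (a, b))))
        st)
    (PySem.Set.empty, [])).2

def get_correlated_tickers_py_alt (ticker : String) : List String :=
  let result := (pvEdges.filter (fun p => p.1 == ticker)).map Prod.snd
  if result = [] then ["SPY"] else result

-- ===== PRECONDITION & SPEC =====
def Spec_get_correlated_tickers_py (ticker : String) (out : List String) : Prop := out = get_correlated_tickers_py_alt ticker
instance (ticker : String) (out : List String) : Decidable (Spec_get_correlated_tickers_py ticker out) := by unfold Spec_get_correlated_tickers_py; infer_instance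

-- ===== CLAIM =====
def Claim_equal_get_correlated_tickers_py : Prop := ∀ (ticker : String), Dom_get_correlated_tickers_py ticker → Spec_get_correlated_tickers_py ticker (get_correlated_tickers_py ticker)

-- ===== LEMMAS AND PROOFS =====

-- ===== VERDICT =====
theorem get_correlated_tickers_py_spec : Claim_equal_get_correlated_tickers_py := by
  intro ticker _
  unfold Spec_get_correlated_tickers_py
  by_cases h0 : ticker = "SPY"
  · subst h0; decide
  by_cases h1 : ticker = "QQQ"
  · subst h1; decide
  by_cases h2 : ticker = "IWM"
  · subst h2; decide
  by_cases h3 : ticker = "DIA"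
  · subst h3; decide
  by_cases h4 : ticker = "AAPL"
  · subst h4; decide
  by_cases h5 : ticker = "MSFT"
  · subst h5; decide
  by_cases h6 : ticker = "GOOGL"
  · subst h6; decide
  by_cases h7 : ticker = "AMZN"
  · subst h7; decide
  by_cases h8 : ticker = "NVDA"
  · subst h8; decide
  by_cases h9 : ticker = "META"
  · subst h9; decide
  by_cases h10 : ticker = "TSLA"
  · subst h10; decide
  by_cases h11 : ticker = "JPM"
  · subst h11; decide
  by_cases h12 : ticker = "BAC"
  · subst h12; decide
  by_cases h13 : ticker = "GS"
  · subst h13; decide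
  by_cases h14 : ticker = "MS"
  · subst h14; decide
  by_cases h15 : ticker = "C"
  · subst h15; decide
  by_cases h16 : ticker = "WFC"
  · subst h16; decide
  by_cases h17 : ticker = "XLF"
  · subst h17; decide
  simp [get_correlated_tickers_py, get_correlated_tickers_py_alt, pvEdges, pvGroups,
        PySem.Set.empty, PySem.Set.add, PySem.Set.contains,
        h0, h1, h2, h3, h4, h5, h6, h7, h8, h9, h10, h11, h12, h13, h14, h15, h16, h17,
        Ne.symm h0, Ne.symm h1, Ne.symm h2, Ne.symm h3, Ne.symm h4, Ne.symm h5, Ne.symm h6,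
        Ne.symm h7, Ne.symm h8, Ne.symm h9, Ne.symm h10, Ne.symm h11, Ne.symm h12, Ne.symm h13,
        Ne.symm h14, Ne.symm h15, Ne.symm h16, Ne.symm h17]
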